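-- pv_equiv track=rewrite | github.com/pon07029/Baekjoon | 7516.py | f
-- ===== SOURCE A (Python) =====
-- import math
--
-- def f(x):
--     g={}
--     re=1
--     while x != 1:
--             for i in range(2, int(math.sqrt(x)) + 1):
--                 if x % i == 0:
--                     x = x // i
--                     if i in g:
--                         g[i] += 1
--                     else:
--                         g[i] = 1
--                     break
--             else:
--                 if x in g:
--                         g[x] += 1
--                 else:
--                         g[x] = 1
--                 break
--     for k, v in g.items():
--         re *= (2*v + 1)
--         re-=v
--     return re
-- ===== SOURCE B (Python) =====
-- import math
--
-- def f(x):
--     g = {}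
--     d = 2
--     while d <= int(math.sqrt(x)):
--         while x % d == 0:
--             x //= d
--             g[d] = g.get(d, 0) + 1
--         d += 1
--     if x != 1:
--         g[x] = g.get(x, 0) + 1
--     re = 1
--     for k, v in g.items():
--         re *= 2 * v + 1
--         re -= v
--     return re
-- ===== Notes on version B (the rewrite author's own statement) =====
-- stated objective: simpler
-- what changed: A restarts its full trial-division scan from the smallest candidate after every single factor it removes; B makes one forward pass over candidate divisors, stripping each divisor completely with an inner while before advancing, then records the remaining factor once after the loop.
import Mathlib
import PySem

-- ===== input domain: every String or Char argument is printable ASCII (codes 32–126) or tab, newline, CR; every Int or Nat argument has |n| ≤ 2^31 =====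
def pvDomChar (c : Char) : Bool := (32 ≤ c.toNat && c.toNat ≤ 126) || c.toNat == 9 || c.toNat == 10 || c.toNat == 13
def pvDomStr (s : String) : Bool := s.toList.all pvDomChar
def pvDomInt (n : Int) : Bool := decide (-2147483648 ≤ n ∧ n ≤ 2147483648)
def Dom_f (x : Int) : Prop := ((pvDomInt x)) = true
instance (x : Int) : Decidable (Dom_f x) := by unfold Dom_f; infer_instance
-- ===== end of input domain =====

-- B replaces A's restart-from-2 trial division (one factor removed per full rescan) by a single
-- forward pass over candidate divisors that strips each divisor completely before advancing: simpler.

-- int(math.sqrt(x)) for 0 ≤ x ≤ 2^31 (float sqrt is exact on this range)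
def pvSq (x : Int) : Int := (Nat.sqrt x.toNat : Int)

-- ===== PORT A =====
-- `if i in g: g[i] += 1 else: g[i] = 1` (modify d k dflt f is d[k] = f(d.get(k, dflt)))
def pvInc (g : PySem.Dict Int Int) (i : Int) : PySem.Dict Int Int :=
  if g.contains i then g.modify i 0 (· + 1) else g.insert i 1

-- the `for i in range(2, int(math.sqrt(x)) + 1): if x % i == 0: … break` scan (some i = break hit)
def pvFindDiv (x : Int) : Option Int :=
  (PySem.List.pyRange 2 (pvSq x + 1)).find? (fun i => PySem.Int.mod x i == 0)

theorem pvFindDiv_some {x i : Int} (h : pvFindDiv x = some i) :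
    2 ≤ i ∧ i ≤ pvSq x ∧ PySem.Int.mod x i = 0 := by
  have hmem := List.mem_of_find?_eq_some h
  have hpred := List.find?_some h
  rw [PySem.List.mem_pyRange_one] at hmem
  refine ⟨hmem.1, by omega, by simpa using hpred⟩

-- 0 < x, 2 ≤ d, x = d * m give 1 ≤ m < x (the quotient shrinks)
theorem pvDivShrink {x d m : Int} (hx : 0 < x) (hd : 2 ≤ d) (hm : x = d * m) :
    1 ≤ m ∧ m < x := by
  have hd0 : (0 : Int) < d := lt_of_lt_of_le zero_lt_two hd
  have hm0 : (0 : Int) < m := Int.pos_of_mul_pos_right (hm ▸ hx) hd0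
  refine ⟨hm0, ?_⟩
  calc m = 1 * m := (one_mul m).symm
  _ < d * m := mul_lt_mul_of_pos_right (lt_of_lt_of_le one_lt_two hd) hm0
  _ = x := hm.symm

theorem pvFindDiv_some_lt {x i : Int} (h : pvFindDiv x = some i) :
    (PySem.Int.floordiv x i).toNat < x.toNat := by
  obtain ⟨h2, hle, hmod⟩ := pvFindDiv_some h
  have hi0 : (0 : Int) < i := lt_of_lt_of_le zero_lt_two h2
  have hx : (0 : Int) < x := by
    by_contra hc
    rw [show pvSq x = 0 from by
      simp only [pvSq, Int.toNat_of_nonpos (not_lt.mp hc), Nat.sqrt_zero, Nat.cast_zero]] at hle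
    exact absurd (le_trans h2 hle) (by norm_num)
  obtain ⟨m, hm⟩ := (PySem.Int.mod_eq_zero_iff_dvd x i).mp hmod
  have hfl : PySem.Int.floordiv x i = m := by
    rw [PySem.Int.floordiv_eq_ediv_of_pos hi0, hm, Int.mul_ediv_cancel_left _ hi0.ne']
  obtain ⟨hm1, hmx⟩ := pvDivShrink hx h2 hm
  rw [hfl]
  exact (Int.toNat_lt_toNat hx).mpr hmx

-- the `while x != 1:` loop of A, carrying the dict g
def pvLoopA (x : Int) (g : PySem.Dict Int Int) : PySem.Dict Int Int :=
  if x = 1 then g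
  else
    match h : pvFindDiv x with
    | some i => pvLoopA (PySem.Int.floordiv x i) (pvInc g i)
    | none => pvInc g x
termination_by x.toNat
decreasing_by exact pvFindDiv_some_lt h

def f (x : Int) : Int :=
  (pvLoopA x PySem.Dict.empty).items.foldl (fun re kv => re * (2 * kv.2 + 1) - kv.2) 1

-- ===== PORT B =====
-- inner `while x % d == 0: x //= d; g[d] = g.get(d, 0) + 1`
-- (`0 < x ∧ 2 ≤ d` is a termination-only guard: every reachable call has x > 0 and d ≥ 2)
theorem pvStrip_dec {d x : Int} (h : 0 < x ∧ 2 ≤ d ∧ PySem.Int.mod x d = 0) :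
    (PySem.Int.floordiv x d).toNat < x.toNat := by
  obtain ⟨hx, hd, hmod⟩ := h
  have hd0 : (0 : Int) < d := lt_of_lt_of_le zero_lt_two hd
  obtain ⟨m, hm⟩ := (PySem.Int.mod_eq_zero_iff_dvd x d).mp hmod
  have hfl : PySem.Int.floordiv x d = m := by
    rw [PySem.Int.floordiv_eq_ediv_of_pos hd0, hm, Int.mul_ediv_cancel_left _ hd0.ne']
  obtain ⟨hm1, hmx⟩ := pvDivShrink hx hd hm
  rw [hfl]
  exact (Int.toNat_lt_toNat hx).mpr hmx

def pvStrip (d x : Int) (g : PySem.Dict Int Int) : Int × PySem.Dict Int Int :=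
  if h : 0 < x ∧ 2 ≤ d ∧ PySem.Int.mod x d = 0 then
    pvStrip d (PySem.Int.floordiv x d) (g.insert d (g.getD d 0 + 1))
  else (x, g)
termination_by x.toNat
decreasing_by exact pvStrip_dec h

theorem pvStrip_eq (d x : Int) (g : PySem.Dict Int Int) :
    pvStrip d x g =
      if h : 0 < x ∧ 2 ≤ d ∧ PySem.Int.mod x d = 0 then
        pvStrip d (PySem.Int.floordiv x d) (g.insert d (g.getD d 0 + 1))
      else (x, g) := by
  rw [pvStrip]

theorem pvStrip_fst_le_aux (n : Nat) : ∀ (d x : Int) (g : PySem.Dict Int Int),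
    x.toNat ≤ n → (pvStrip d x g).1.toNat ≤ x.toNat := by
  induction n with
  | zero =>
      intro d x g hx
      by_cases hc : 0 < x ∧ 2 ≤ d ∧ PySem.Int.mod x d = 0
      · exact absurd hx (Nat.not_le.mpr ((Int.toNat_lt_toNat hc.1).mpr hc.1))
      · rw [pvStrip_eq, dif_neg hc]
  | succ n ih =>
      intro d x g hx
      by_cases hc : 0 < x ∧ 2 ≤ d ∧ PySem.Int.mod x d = 0
      · rw [pvStrip_eq, dif_pos hc]
        have hlt := pvStrip_dec hc
        have h2 := ih d (PySem.Int.floordiv x d) (g.insert d (g.getD d 0 + 1))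
          (Nat.lt_succ_iff.mp (Nat.lt_of_lt_of_le hlt hx))
        exact Nat.le_trans h2 (Nat.le_of_lt hlt)
      · rw [pvStrip_eq, dif_neg hc]

theorem pvStrip_fst_le (d x : Int) (g : PySem.Dict Int Int) :
    (pvStrip d x g).1.toNat ≤ x.toNat :=
  pvStrip_fst_le_aux x.toNat d x g (le_refl _)

theorem pvOuterB_dec (d x : Int) (g : PySem.Dict Int Int) (h : d ≤ pvSq x) :
    (pvSq (pvStrip d x g).1 + 1 - (d + 1)).toNat < (pvSq x + 1 - d).toNat := by
  have h2 : pvSq (pvStrip d x g).1 ≤ pvSq x :=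
    Nat.cast_le.mpr (Nat.sqrt_le_sqrt (pvStrip_fst_le d x g))
  have hb : 0 < pvSq x + 1 - d := Int.sub_pos.mpr (lt_of_le_of_lt h (lt_add_one _))
  refine (Int.toNat_lt_toNat hb).mpr ?_
  rw [add_sub_add_right_eq_sub]
  exact lt_of_le_of_lt (sub_le_sub_right h2 d)
    (sub_lt_sub_right (lt_add_one _) d)

-- outer `while d <= int(math.sqrt(x)):` loop, returning (final x, g)
def pvOuterB (d x : Int) (g : PySem.Dict Int Int) : Int × PySem.Dict Int Int :=
  if h : d ≤ pvSq x then
    pvOuterB (d + 1) (pvStrip d x g).1 (pvStrip d x g).2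
  else (x, g)
termination_by (pvSq x + 1 - d).toNat
decreasing_by exact pvOuterB_dec d x g h

def f_alt (x : Int) : Int :=
  let p := pvOuterB 2 x PySem.Dict.empty
  let g := if p.1 ≠ 1 then p.2.insert p.1 (p.2.getD p.1 0 + 1) else p.2
  g.items.foldl (fun re kv => re * (2 * kv.2 + 1) - kv.2) 1

-- ===== PRECONDITION & SPEC =====
-- Pre_ excludes exactly x < 0, where A raises ValueError in int(math.sqrt(x)) (B raises there too).
def Pre_f (x : Int) : Prop := 0 ≤ x
instance (x : Int) : Decidable (Pre_f x) := by unfold Pre_f; infer_instance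
def pvWitness_f : Int := (12)

def Spec_f (x : Int) (out : Int) : Prop := out = f_alt x
instance (x : Int) (out : Int) : Decidable (Spec_f x out) := by unfold Spec_f; infer_instance

-- ===== CLAIM (what is proved, stated in full; the proofs are below) =====
def Claim_equal_f : Prop := ∀ (x : Int), Dom_f x → Pre_f x → Spec_f x (f x)

-- ===== LEMMAS AND PROOFS =====

-- the `if x != 1: g[x] = g.get(x, 0) + 1` tail of B
def pvFinishB (p : Int × PySem.Dict Int Int) : PySem.Dict Int Int :=
  if p.1 ≠ 1 then p.2.insert p.1 (p.2.getD p.1 0 + 1) else p.2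

-- unfolding lemmas for A's loop (the match in pvLoopA is dependent, so rw alone cannot step it)
theorem pvLoopA_one (g : PySem.Dict Int Int) : pvLoopA 1 g = g := by
  rw [pvLoopA]; simp

theorem pvLoopA_some {x i : Int} (g : PySem.Dict Int Int) (hx1 : x ≠ 1)
    (h : pvFindDiv x = some i) :
    pvLoopA x g = pvLoopA (PySem.Int.floordiv x i) (pvInc g i) := by
  rw [pvLoopA, if_neg hx1]
  split
  · rename_i i' h'; rw [h] at h'; cases h'; rfl
  · rename_i h'; rw [h] at h'; cases h'

theorem pvLoopA_none {x : Int} (g : PySem.Dict Int Int) (hx1 : x ≠ 1)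
    (h : pvFindDiv x = none) : pvLoopA x g = pvInc g x := by
  rw [pvLoopA, if_neg hx1]
  split
  · rename_i i' h'; rw [h] at h'; cases h'
  · rfl

-- A's two-branch increment equals B's get-default increment
theorem pvInc_eq (g : PySem.Dict Int Int) (i : Int) :
    pvInc g i = g.insert i (g.getD i 0 + 1) := by
  unfold pvInc
  by_cases h : g.contains i
  · simp [h]; rfl
  · rw [if_neg (by simp [h]),
      PySem.Dict.getD_of_not_contains g 0 (by simpa using h)]
    norm_num

theorem pvSq_ge {x d : Int} (h0 : 0 ≤ x) (h2 : 0 ≤ d) (h : d * d ≤ x) : d ≤ pvSq x := by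
  have hdt : (d.toNat : Int) = d := by omega
  have hxt : d.toNat * d.toNat ≤ x.toNat := by
    have : (↑(d.toNat * d.toNat) : Int) ≤ (x.toNat : Int) := by push_cast; rw [hdt]; omega
    exact_mod_cast this
  have := Nat.le_sqrt.mpr hxt
  simp only [pvSq]; omega

theorem pvSq_spec_le {x d : Int} (h0 : 0 ≤ x) (h : d ≤ pvSq x) (h2 : 0 ≤ d) : d * d ≤ x := by
  have hd : d.toNat ≤ Nat.sqrt x.toNat := by simp only [pvSq] at h; omega
  have h1 : d.toNat * d.toNat ≤ x.toNat :=
    le_trans (Nat.mul_le_mul hd hd) (by nlinarith [Nat.sqrt_le' x.toNat])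
  have hdt : (d.toNat : Int) = d := by omega
  have : (↑(d.toNat * d.toNat) : Int) ≤ (x.toNat : Int) := by exact_mod_cast h1
  push_cast at this
  rw [hdt] at this
  omega

-- MAIN LEMMA: with no divisor of x below d left to find, A's restart loop and B's forward pass
-- (plus its final insertion step) build the same dict.
theorem pvMain (n : Nat) : ∀ (x d : Int) (g : PySem.Dict Int Int),
    x.toNat + (pvSq x + 1 - d).toNat = n → 0 ≤ x → 2 ≤ d →
    (∀ i : Int, 2 ≤ i → i < d → PySem.Int.mod x i ≠ 0) →
    pvLoopA x g = pvFinishB (pvOuterB d x g) := by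
  induction n using Nat.strong_induction_on with
  | _ n IH =>
    intro x d g hn hx hd hnd
    by_cases hx1 : x = 1
    · subst hx1
      rw [pvLoopA_one, pvOuterB]
      have hsq1 : pvSq 1 = 1 := by decide
      simp [pvFinishB, hsq1, show ¬ d ≤ 1 by omega]
    · by_cases hds : d ≤ pvSq x
      · by_cases hdvd : PySem.Int.mod x d = 0
        · -- d divides x: A removes one copy of d, B strips them all; align one step of each.
          have hxx : 4 ≤ x := by nlinarith [pvSq_spec_le hx hds (by omega : (0:Int) ≤ d)]
          obtain ⟨m, hm⟩ := (PySem.Int.mod_eq_zero_iff_dvd x d).mp hdvd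
          have hfl : PySem.Int.floordiv x d = m := by
            rw [PySem.Int.floordiv_eq_ediv_of_pos (by omega), hm,
              Int.mul_ediv_cancel_left _ (by omega)]
          have hm1 : 1 ≤ m := by nlinarith
          have hmx : m < x := by nlinarith
          have hnd' : ∀ i : Int, 2 ≤ i → i < d → PySem.Int.mod m i ≠ 0 := by
            intro i h2i hid hmod
            obtain ⟨k, hk⟩ := (PySem.Int.mod_eq_zero_iff_dvd m i).mp hmod
            exact hnd i h2i hid ((PySem.Int.mod_eq_zero_iff_dvd x i).mpr
              ⟨d * k, by rw [hm, hk]; ring⟩)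
          -- A side: the for-scan finds d first
          have hfind : pvFindDiv x = some d := by
            unfold pvFindDiv
            rw [PySem.List.pyRange_one_append 2 d (pvSq x + 1) (by omega) (by omega),
                List.find?_append]
            have h1 : (PySem.List.pyRange 2 d).find? (fun i => PySem.Int.mod x i == 0) = none := by
              rw [List.find?_eq_none]
              intro i hi
              rw [PySem.List.mem_pyRange_one] at hi
              simpa using hnd i hi.1 hi.2
            rw [h1, PySem.List.pyRange_one_cons (by omega)]
            simp [hdvd]
          rw [pvLoopA_some g hx1 hfind, hfl]
          rw [IH (m.toNat + (pvSq m + 1 - d).toNat) (by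
              have : Nat.sqrt m.toNat ≤ Nat.sqrt x.toNat := Nat.sqrt_le_sqrt (by omega)
              simp only [pvSq] at *; omega)
            m d (pvInc g d) rfl (by omega) hd hnd']
          -- B side: pvOuterB d x g takes one strip step to (pvStrip d m g')
          have hBx : pvOuterB d x g =
              pvOuterB (d + 1) (pvStrip d m (pvInc g d)).1 (pvStrip d m (pvInc g d)).2 := by
            rw [pvOuterB, dif_pos hds, pvStrip, dif_pos ⟨by omega, hd, hdvd⟩, hfl, ← pvInc_eq]
          rw [hBx]
          set g' := pvInc g d with hg'
          by_cases hds' : d ≤ pvSq m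
          · -- B's outer loop re-enters the same divisor
            rw [show pvOuterB d m g' =
                pvOuterB (d + 1) (pvStrip d m g').1 (pvStrip d m g').2 from by
              rw [pvOuterB, dif_pos hds']]
          · by_cases hdvd2 : PySem.Int.mod m d = 0
            · -- d divides m but d > sqrt m: forces m = d (no smaller factor exists)
              obtain ⟨k, hk⟩ := (PySem.Int.mod_eq_zero_iff_dvd m d).mp hdvd2
              have hk1 : 1 ≤ k := by nlinarith
              have hkd : k < d := by
                by_contra hc
                exact hds' (pvSq_ge (by omega) (by omega) (by nlinarith))
              have hk2 : k = 1 := by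
                by_contra hc
                exact hnd' k (by omega) hkd
                  ((PySem.Int.mod_eq_zero_iff_dvd m k).mpr ⟨d, by rw [hk]; ring⟩)
              have hmd : m = d := by rw [hk, hk2, mul_one]
              -- strip once more down to 1
              have hstrip2 : pvStrip d m g' = (1, g'.insert d (g'.getD d 0 + 1)) := by
                rw [pvStrip, dif_pos ⟨by omega, hd, hdvd2⟩]
                have hdd : PySem.Int.floordiv m d = 1 := by
                  rw [hmd, PySem.Int.floordiv_eq_ediv_of_pos (by omega),
                    Int.ediv_self (by omega)]
                rw [hdd, pvStrip, dif_neg (by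
                  rintro ⟨-, -, hmod1⟩
                  rw [PySem.Int.mod_eq_emod_of_pos (by omega),
                    Int.emod_eq_of_lt (by omega) (by omega)] at hmod1
                  omega)]
              rw [hstrip2]
              rw [show pvOuterB (d + 1) 1 (g'.insert d (g'.getD d 0 + 1)) =
                  (1, g'.insert d (g'.getD d 0 + 1)) from by
                rw [pvOuterB, dif_neg (by rw [show pvSq 1 = 1 from by decide]; omega)]]
              rw [show pvOuterB d m g' = (m, g') from by rw [pvOuterB, dif_neg hds']]
              simp [pvFinishB, hmd, show d ≠ 1 by omega]
            · -- d no longer divides: both sides stop at (m, g')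
              have hstrip2 : pvStrip d m g' = (m, g') := by
                rw [pvStrip, dif_neg (by rintro ⟨-, -, h⟩; exact hdvd2 h)]
              rw [hstrip2]
              rw [show pvOuterB (d + 1) m g' = (m, g') from by
                rw [pvOuterB, dif_neg (by simp only [pvSq] at *; omega)]]
              rw [show pvOuterB d m g' = (m, g') from by rw [pvOuterB, dif_neg hds']]
        · -- d does not divide x: B advances d, A's state unchanged
          have hBx : pvOuterB d x g = pvOuterB (d + 1) x g := by
            rw [pvOuterB, dif_pos hds, pvStrip,
              dif_neg (by rintro ⟨-, -, h⟩; exact hdvd h)]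
          rw [hBx]
          exact IH (x.toNat + (pvSq x + 1 - (d + 1)).toNat)
            (by simp only [pvSq] at *; omega) x (d + 1) g rfl hx (by omega)
            (by intro i h2i hid
                by_cases hi' : i = d
                · subst hi'; exact hdvd
                · exact hnd i h2i (by omega))
      · -- d exceeded sqrt x: B stops and records the remaining factor; A's scan finds nothing
        have hfind : pvFindDiv x = none := by
          unfold pvFindDiv
          rw [List.find?_eq_none]
          intro i hi
          rw [PySem.List.mem_pyRange_one] at hi
          simpa using hnd i hi.1 (by omega)
        rw [pvLoopA_none g hx1 hfind]
        rw [show pvOuterB d x g = (x, g) from by rw [pvOuterB, dif_neg hds]]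
        simp [pvFinishB, hx1, pvInc_eq]

-- ===== VERDICT (by name: the statement is the Claim_ definition above) =====
theorem f_spec : Claim_equal_f := by
  intro x _ hpre
  unfold Spec_f f f_alt
  rw [pvMain (x.toNat + (pvSq x + 1 - 2).toNat) x 2 PySem.Dict.empty rfl hpre
    (by omega) (by intro i h2 hlt; omega)]
  rfl
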